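-- pv_equiv track=rewrite | github.com/MarcosBianchii/Teoria-de-Algoritmos | guias/reducciones/16.py | verificador_hitting_set
-- ===== SOURCE A (Python) =====
-- def verificador_hitting_set(A, Bs, k, C):
--     """
--     La complejidad del verificador es O(n * m)
--     """
--     if len(C) > k:
--         return False
--
--     # O(c)
--     if any(c not in A for c in C):
--         return False
--
--     # O(n * m)
--     for b in Bs:
--         if all(x not in C for x in b):
--             return False
--
--     return True
-- ===== SOURCE B (Python) =====
-- def verificador_hitting_set(A, Bs, k, C):
--     if len(C) > k:
--         return False
--
--     As = set(A)
--     if any(c not in As for c in C):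
--         return False
--
--     # inverted index: element -> list of indices of the sets it occurs in
--     pairs = [(x, i) for i, b in enumerate(Bs) for x in b]
--     index = {}
--     for x, i in pairs:
--         index.setdefault(x, []).append(i)
--
--     covered = set()
--     for c in C:
--         covered.update(index.get(c, []))
--     return len(covered) == len(Bs)
-- ===== Notes on version B (the rewrite author's own statement) =====
-- stated objective: alternative
-- what changed: Replaces A's per-set rescan of C by an inverted index element->set-indices built in one pass over Bs; C then drives a union of covered indices, and validity is |covered| == len(Bs).
import Mathlib
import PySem

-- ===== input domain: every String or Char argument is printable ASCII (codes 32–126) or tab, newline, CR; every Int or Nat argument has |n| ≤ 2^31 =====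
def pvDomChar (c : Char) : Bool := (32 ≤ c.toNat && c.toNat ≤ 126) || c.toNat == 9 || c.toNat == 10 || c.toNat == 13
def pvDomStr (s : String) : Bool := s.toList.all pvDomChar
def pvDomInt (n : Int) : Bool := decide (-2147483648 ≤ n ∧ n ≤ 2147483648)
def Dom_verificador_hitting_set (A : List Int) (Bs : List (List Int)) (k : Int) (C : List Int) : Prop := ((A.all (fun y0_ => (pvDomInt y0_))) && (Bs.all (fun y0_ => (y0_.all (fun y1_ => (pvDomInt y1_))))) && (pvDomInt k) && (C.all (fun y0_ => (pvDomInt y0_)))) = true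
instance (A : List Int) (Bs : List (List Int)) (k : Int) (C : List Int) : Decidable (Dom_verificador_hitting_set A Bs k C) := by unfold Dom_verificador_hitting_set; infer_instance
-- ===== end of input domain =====

-- B replaces A's per-set rescan of C by an inverted index (element -> indices of the sets containing it)
-- and a covered-index set driven by C; validity of the coverage part becomes len(covered) == len(Bs).

-- ===== PORT A =====
def verificador_hitting_set (A : List Int) (Bs : List (List Int)) (k : Int) (C : List Int) : Bool :=
  if (C.length : Int) > k then false
  else if C.any (fun c => !(A.contains c)) then false
  else if Bs.any (fun b => b.all (fun x => !(C.contains x))) then false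
  else true

-- ===== PORT B =====
-- pairs = [(x, i) for i, b in enumerate(Bs) for x in b]
def vhsPairs (Bs : List (List Int)) : List (Int × Int) :=
  (PySem.List.enumerate Bs 0).flatMap (fun p => p.2.map (fun x => (x, p.1)))

-- index = {}; for x, i in pairs: index.setdefault(x, []).append(i)
def vhsIndex (Bs : List (List Int)) : PySem.Dict Int (List Int) :=
  (vhsPairs Bs).foldl (fun d q => d.modify q.1 [] (fun v => v ++ [q.2])) PySem.Dict.empty

def verificador_hitting_set_alt (A : List Int) (Bs : List (List Int)) (k : Int) (C : List Int) : Bool :=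
  if (C.length : Int) > k then false
  else
    let As : PySem.Set Int := PySem.Set.ofList A
    if C.any (fun c => !(PySem.Set.contains As c)) then false
    else
      let index := vhsIndex Bs
      let covered : PySem.Set Int :=
        C.foldl (fun s c => PySem.Set.update s (index.getD c [])) PySem.Set.empty
      PySem.Set.len covered == (Bs.length : Int)

-- ===== PRECONDITION & SPEC =====
def Spec_verificador_hitting_set (A : List Int) (Bs : List (List Int)) (k : Int) (C : List Int) (out : Bool) : Prop := out = verificador_hitting_set_alt A Bs k C
instance (A : List Int) (Bs : List (List Int)) (k : Int) (C : List Int) (out : Bool) : Decidable (Spec_verificador_hitting_set A Bs k C out) := by unfold Spec_verificador_hitting_set; infer_instance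

-- ===== CLAIM (what is proved, stated in full; the proofs are below) =====
def Claim_equal_verificador_hitting_set : Prop := ∀ (A : List Int) (Bs : List (List Int)) (k : Int) (C : List Int), Dom_verificador_hitting_set A Bs k C → Spec_verificador_hitting_set A Bs k C (verificador_hitting_set A Bs k C)

-- ===== LEMMAS AND PROOFS =====

theorem mem_vhsPairs (Bs : List (List Int)) (c i : Int) :
    (c, i) ∈ vhsPairs Bs ↔ ∃ (j : Nat) (h : j < Bs.length), i = (j : Int) ∧ c ∈ Bs[j] := by
  simp only [vhsPairs, List.mem_flatMap, List.mem_map, PySem.List.mem_enumerate_iff]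
  constructor
  · rintro ⟨p, ⟨j, hj, rfl⟩, x, hx, hxe⟩
    cases hxe
    refine ⟨j, hj, by simp, by simpa using hx⟩
  · rintro ⟨j, hj, rfl, hc⟩
    exact ⟨((j : Int), Bs[j]), ⟨j, hj, by simp⟩, c, hc, rfl⟩

theorem mem_vhsIndex (Bs : List (List Int)) (c i : Int) :
    i ∈ (vhsIndex Bs).getD c [] ↔ ∃ (j : Nat) (h : j < Bs.length), i = (j : Int) ∧ c ∈ Bs[j] := by
  rw [← mem_vhsPairs]
  simp only [vhsIndex, PySem.Dict.getD_foldl_modify_append, PySem.Dict.getD_empty,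
    List.nil_append, List.mem_map, List.mem_filter]
  constructor
  · rintro ⟨q, ⟨hq, he⟩, rfl⟩
    have : q.1 = c := by simpa using he
    simpa [← this] using hq
  · intro h
    exact ⟨(c, i), ⟨h, by simp⟩, rfl⟩

theorem mem_foldl_update {α : Type} [BEq α] [LawfulBEq α] (f : Int → List α) (C : List Int)
    (s : PySem.Set α) (y : α) :
    y ∈ C.foldl (fun s c => PySem.Set.update s (f c)) s ↔ y ∈ s ∨ ∃ c ∈ C, y ∈ f c := by
  induction C generalizing s with
  | nil => simp
  | cons c C ih =>
    simp only [List.foldl_cons, ih, PySem.Set.mem_update, List.mem_cons]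
    constructor
    · rintro (⟨h | h⟩ | ⟨c', hc', h⟩)
      · exact Or.inl h
      · exact Or.inr ⟨c, Or.inl rfl, h⟩
      · exact Or.inr ⟨c', Or.inr hc', h⟩
    · rintro (h | ⟨c', hc' | hc', h⟩)
      · exact Or.inl (Or.inl h)
      · exact Or.inl (Or.inr (hc' ▸ h))
      · exact Or.inr ⟨c', hc', h⟩

theorem nodup_foldl_update {α : Type} [BEq α] [LawfulBEq α] (f : Int → List α) (C : List Int)
    (s : PySem.Set α) (hs : s.Nodup) :
    (C.foldl (fun s c => PySem.Set.update s (f c)) s).Nodup := by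
  induction C generalizing s with
  | nil => exact hs
  | cons c C ih => exact ih _ (PySem.Set.nodup_update _ _ hs)

-- counting: a nodup list characterised as {0,…,n-1} ∩ P has length n iff P holds below n
theorem nodup_count_lemma (covered : List Int) (n : Nat) (P : Nat → Prop)
    (hnd : covered.Nodup)
    (h : ∀ i, i ∈ covered ↔ ∃ (j : Nat) (_ : j < n), i = (j : Int) ∧ P j) :
    covered.length = n ↔ ∀ j : Nat, j < n → P j := by
  classical
  set T : List Int := (List.range n).map (fun j => Int.ofNat j) with hT
  have hTmem : ∀ x : Int, x ∈ T ↔ ∃ j : Nat, j < n ∧ x = (j : Int) := by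
    intro x
    rw [hT, List.mem_map]
    constructor
    · rintro ⟨j, hj, rfl⟩; exact ⟨j, List.mem_range.mp hj, rfl⟩
    · rintro ⟨j, hj, rfl⟩; exact ⟨j, List.mem_range.mpr hj, rfl⟩
  have hTnd : T.Nodup := by
    rw [hT]
    apply List.Nodup.map _ List.nodup_range
    intro a b hab
    simpa using hab
  have hTlen : T.length = n := by simp [hT]
  constructor
  · intro hlen j hj
    have hsub : covered.toFinset ⊆ T.toFinset := by
      intro x hx
      rw [List.mem_toFinset] at hx ⊢
      obtain ⟨j', hj', rfl, _⟩ := (h x).mp hx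
      exact (hTmem _).mpr ⟨j', hj', rfl⟩
    have hc1 : covered.toFinset.card = n := by
      rw [List.toFinset_card_of_nodup hnd, hlen]
    have hc2 : T.toFinset.card = n := by
      rw [List.toFinset_card_of_nodup hTnd, hTlen]
    have heq : covered.toFinset = T.toFinset :=
      Finset.eq_of_subset_of_card_le hsub (by omega)
    have hjc : (j : Int) ∈ covered := by
      rw [← List.mem_toFinset, heq, List.mem_toFinset]
      exact (hTmem _).mpr ⟨j, hj, rfl⟩
    obtain ⟨j', hj', hje, hp⟩ := (h _).mp hjc
    have : j' = j := by omega
    exact this ▸ hp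
  · intro hp
    have hperm : covered.Perm T := by
      rw [List.perm_ext_iff_of_nodup hnd hTnd]
      intro x
      rw [h x, hTmem x]
      constructor
      · rintro ⟨j, hj, rfl, _⟩; exact ⟨j, hj, rfl⟩
      · rintro ⟨j, hj, rfl⟩; exact ⟨j, hj, rfl, hp j hj⟩
    rw [hperm.length_eq, hTlen]

-- ===== VERDICT (by name: the statement is the Claim_ definition above) =====
theorem verificador_hitting_set_spec : Claim_equal_verificador_hitting_set := by
  intro A Bs k C _
  unfold Spec_verificador_hitting_set verificador_hitting_set verificador_hitting_set_alt
  have hcontains : (fun c => !(PySem.Set.contains (PySem.Set.ofList A) c))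
      = (fun c => !(A.contains c)) := by
    funext c
    by_cases hc : c ∈ A <;> simp [PySem.Set.mem_ofList, hc]
  simp only [hcontains]
  by_cases h1 : (C.length : Int) > k
  · rw [if_pos h1, if_pos h1]
  · rw [if_neg h1, if_neg h1]
    cases h2 : C.any (fun c => !(A.contains c)) with
    | true => simp
    | false =>
      simp only [Bool.false_eq_true, if_false]
      set covered := C.foldl (fun s c => PySem.Set.update s ((vhsIndex Bs).getD c []))
        PySem.Set.empty with hcov
      have hmem : ∀ i, i ∈ covered ↔
          ∃ (j : Nat) (_ : j < Bs.length), i = (j : Int) ∧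
            ∃ c ∈ C, ∃ (_ : j < Bs.length), c ∈ Bs[j] := by
        intro i
        rw [hcov, mem_foldl_update]
        simp only [PySem.Set.empty, List.not_mem_nil, false_or, mem_vhsIndex]
        constructor
        · rintro ⟨c, hc, j, hj, rfl, hm⟩; exact ⟨j, hj, rfl, c, hc, hj, hm⟩
        · rintro ⟨j, hj, rfl, c, hc, hj2, hm⟩; exact ⟨c, hc, j, hj, rfl, hm⟩
      have hnd : covered.Nodup := nodup_foldl_update _ _ _ (List.nodup_nil)
      have hkey := nodup_count_lemma covered Bs.length
        (fun j => ∃ c ∈ C, ∃ (_ : j < Bs.length), c ∈ Bs[j]) hnd hmem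
      have hany : (Bs.any (fun b => b.all fun x => !(C.contains x))) = false ↔
          (∀ j : Nat, j < Bs.length → ∃ c ∈ C, ∃ (_ : j < Bs.length), c ∈ Bs[j]) := by
        simp only [List.any_eq_false, List.all_eq_true, Bool.not_eq_true']
        constructor
        · intro hb j hj
          have h := hb Bs[j] (List.getElem_mem hj)
          push Not at h
          obtain ⟨x, hx, hxc⟩ := h
          exact ⟨x, by simpa using hxc, hj, hx⟩
        · intro hall b hb hcon
          obtain ⟨j, hj, rfl⟩ := List.mem_iff_getElem.mp hb
          obtain ⟨c, hc, _, hcb⟩ := hall j hj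
          have := hcon c hcb
          simp at this
          exact this hc
      cases h3 : Bs.any (fun b => b.all fun x => !(C.contains x)) with
      | false =>
        simp only [Bool.false_eq_true, if_false]
        have hlen := hkey.mpr (hany.mp h3)
        simp [PySem.Set.len, hlen]
      | true =>
        simp only [if_true]
        have hne : covered.length ≠ Bs.length := by
          intro he
          have := hany.mpr (hkey.mp he)
          rw [this] at h3
          exact Bool.false_ne_true h3
        symm
        simp [PySem.Set.len]
        omega
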